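-- pv_equiv track=rewrite | github.com/NicoleZlq/metro-expansion | metro_vrp.py | update
-- ===== SOURCE A (Python) =====
-- def update(ret, network,syntax, line0,line1,new):
--
--     for i in range(len(ret)):
--         syntax_sub = syntax[i]
--
--         for j in range(len(syntax_sub)-1):
--
--             for m in range(len(ret[i])):
--
--               if ret[i][m] in range(syntax_sub[j],syntax_sub[j+1]):
--                   network[ret[i][m]] = [syntax_sub[j],syntax_sub[j+1]]
--                   new.append(ret[i][m])
--
--     sorted(new)
--
--     #return
--
--     return network, new
-- ===== SOURCE B (Python) =====
-- def _bisect_left(keys, target):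
--     lo, hi = 0, len(keys)
--     while lo < hi:
--         mid = (lo + hi) // 2
--         if keys[mid] < target:
--             lo = mid + 1
--         else:
--             hi = mid
--     return lo
--
--
-- def update(ret, network, syntax, line0, line1, new):
--     for i in range(len(ret)):
--         bounds = syntax[i]
--         elems = ret[i]
--         # index the sublist once: positions sorted by value
--         order = sorted(range(len(elems)), key=lambda m: elems[m])
--         keys = [elems[m] for m in order]
--         for j in range(len(bounds) - 1):
--             a, b = bounds[j], bounds[j + 1]
--             lo = _bisect_left(keys, a)
--             hi = _bisect_left(keys, b)
--             for m in sorted(order[lo:hi]):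
--                 x = elems[m]
--                 network[x] = [a, b]
--                 new.append(x)
--     return network, new
-- ===== Notes on version B (the rewrite author's own statement) =====
-- stated objective: faster
-- what changed: Instead of scanning every element of the sublist once per interval (A's triple nested loop), B sorts each sublist's positions by value once and binary-searches each interval's two bounds in the sorted keys, emitting each matched block in position order.
import Mathlib
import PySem

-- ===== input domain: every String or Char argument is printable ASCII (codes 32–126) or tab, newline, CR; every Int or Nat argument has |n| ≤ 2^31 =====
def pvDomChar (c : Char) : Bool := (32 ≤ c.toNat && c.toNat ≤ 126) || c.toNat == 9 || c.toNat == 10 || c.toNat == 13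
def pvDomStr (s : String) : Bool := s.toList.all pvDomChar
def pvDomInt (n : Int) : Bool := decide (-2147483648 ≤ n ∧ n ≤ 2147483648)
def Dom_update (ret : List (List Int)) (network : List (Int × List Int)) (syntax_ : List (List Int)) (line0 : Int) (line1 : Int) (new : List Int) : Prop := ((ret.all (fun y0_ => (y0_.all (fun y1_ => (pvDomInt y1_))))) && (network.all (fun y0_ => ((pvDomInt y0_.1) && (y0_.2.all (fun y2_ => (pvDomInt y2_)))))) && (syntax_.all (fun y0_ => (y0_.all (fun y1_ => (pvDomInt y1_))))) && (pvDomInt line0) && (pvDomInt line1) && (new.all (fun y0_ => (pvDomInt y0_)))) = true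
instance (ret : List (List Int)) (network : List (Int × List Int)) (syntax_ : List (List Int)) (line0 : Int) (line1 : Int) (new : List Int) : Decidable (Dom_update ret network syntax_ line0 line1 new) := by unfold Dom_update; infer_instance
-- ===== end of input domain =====

-- B replaces A's linear membership scan per interval by sorting each sublist's positions by value
-- once and binary-searching the two interval bounds (then restoring position order); return values
-- are proved equal — both Pythons also mutate `network`/`new` in place in the same way.

-- ===== PORT A =====
-- triple nested loop: sublist i, interval j, element m;  `x in range(a,b)` is a ≤ x < b.
-- Python's trailing `sorted(new)` is computed and discarded (a no-op), so it is not ported.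
def update (ret : List (List Int)) (network : List (Int × List Int)) (syntax_ : List (List Int)) (line0 : Int) (line1 : Int) (new : List Int) : (List (Int × List Int)) × List Int :=
  let st :=
    (List.range ret.length).foldl (fun (st : PySem.Dict Int (List Int) × List Int) i =>
      let syntax_sub := syntax_.getD i []          -- syntax[i]; Pre_update keeps i in range
      (List.range (syntax_sub.length - 1)).foldl (fun st j =>
        (List.range (ret.getD i []).length).foldl (fun st m =>
          let x := (ret.getD i []).getD m 0
          if syntax_sub.getD j 0 ≤ x ∧ x < syntax_sub.getD (j+1) 0 then
            (st.1.insert x [syntax_sub.getD j 0, syntax_sub.getD (j+1) 0], st.2 ++ [x])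
          else st) st) st)
      (PySem.Dict.mk network, new)
  (st.1.items, st.2)

-- ===== PORT B =====
-- Source B's hand-written `_bisect_left` is the bisect_left loop (lo/hi halving); its Lean form is
-- PySem.List.bisectLeft, which is that same loop (PySem.List.bisectLeftLoop).
def update_alt (ret : List (List Int)) (network : List (Int × List Int)) (syntax_ : List (List Int)) (line0 : Int) (line1 : Int) (new : List Int) : (List (Int × List Int)) × List Int :=
  let st :=
    (List.range ret.length).foldl (fun (st : PySem.Dict Int (List Int) × List Int) i =>
      let bounds := syntax_.getD i []              -- syntax[i]; Pre_update keeps i in range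
      let elems := ret.getD i []
      let order := PySem.List.sorted (List.range elems.length) (fun m => elems.getD m 0)
      let keys := order.map (fun m => elems.getD m 0)
      (List.range (bounds.length - 1)).foldl (fun st j =>
        let a := bounds.getD j 0
        let b := bounds.getD (j+1) 0
        let lo := PySem.List.bisectLeft keys a
        let hi := PySem.List.bisectLeft keys b
        let ms := PySem.List.sorted (PySem.List.slice order (some (lo : Int)) (some (hi : Int))) (fun x => x)
        ms.foldl (fun st m =>
          let x := elems.getD m 0
          (st.1.insert x [a, b], st.2 ++ [x])) st) st)
      (PySem.Dict.mk network, new)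
  (st.1.items, st.2)

-- ===== PRECONDITION & SPEC =====
-- Pre_update excludes exactly the inputs where Python A raises IndexError: `syntax[i]` with
-- len(syntax) < len(ret) (B raises there too).
def Pre_update (ret : List (List Int)) (network : List (Int × List Int)) (syntax_ : List (List Int)) (line0 : Int) (line1 : Int) (new : List Int) : Prop :=
  ret.length ≤ syntax_.length
instance (ret : List (List Int)) (network : List (Int × List Int)) (syntax_ : List (List Int)) (line0 : Int) (line1 : Int) (new : List Int) : Decidable (Pre_update ret network syntax_ line0 line1 new) := by unfold Pre_update; infer_instance
def pvWitness_update : List (List Int) × (List (Int × List Int)) × List (List Int) × Int × Int × List Int :=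
  ([[0, 3], [5]], [(9, [1])], [[0, 2, 4], [4, 6]], 0, 1, [7])
def Spec_update (ret : List (List Int)) (network : List (Int × List Int)) (syntax_ : List (List Int)) (line0 : Int) (line1 : Int) (new : List Int) (out : (List (Int × List Int)) × List Int) : Prop := out = update_alt ret network syntax_ line0 line1 new
instance (ret : List (List Int)) (network : List (Int × List Int)) (syntax_ : List (List Int)) (line0 : Int) (line1 : Int) (new : List Int) (out : (List (Int × List Int)) × List Int) : Decidable (Spec_update ret network syntax_ line0 line1 new out) := by unfold Spec_update; infer_instance

-- ===== CLAIM (what is proved, stated in full; the proofs are below) =====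
def Claim_equal_update : Prop := ∀ (ret : List (List Int)) (network : List (Int × List Int)) (syntax_ : List (List Int)) (line0 : Int) (line1 : Int) (new : List Int), Dom_update ret network syntax_ line0 line1 new → Pre_update ret network syntax_ line0 line1 new → Spec_update ret network syntax_ line0 line1 new (update ret network syntax_ line0 line1 new)

-- ===== LEMMAS AND PROOFS =====

-- The slice of `order` between the two bisection points, re-sorted by position, is exactly the
-- list of positions m (in increasing order) whose value lies in [a, b).
theorem slice_order_eq_filter (elems : List Int) (a b : Int) :
    PySem.List.sorted
      (PySem.List.slice
        (PySem.List.sorted (List.range elems.length) (fun m => elems.getD m 0))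
        (some ((PySem.List.bisectLeft ((PySem.List.sorted (List.range elems.length) (fun m => elems.getD m 0)).map (fun m => elems.getD m 0)) a : Nat) : Int))
        (some ((PySem.List.bisectLeft ((PySem.List.sorted (List.range elems.length) (fun m => elems.getD m 0)).map (fun m => elems.getD m 0)) b : Nat) : Int)))
      (fun x => x)
    = (List.range elems.length).filter (fun m => decide (a ≤ elems.getD m 0 ∧ elems.getD m 0 < b)) := by
  set key : Nat → Int := fun m => elems.getD m 0 with hkey
  set order := PySem.List.sorted (List.range elems.length) key with horder
  set keys := order.map key with hkeys
  set lo := PySem.List.bisectLeft keys a with hlo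
  set hi := PySem.List.bisectLeft keys b with hhi
  have hperm : order.Perm (List.range elems.length) := PySem.List.sorted_perm _ _ _
  have hnodup : order.Nodup := hperm.nodup_iff.mpr List.nodup_range
  have hpw : keys.Pairwise (· ≤ ·) := PySem.List.sorted_map_key_pairwise _ _
  have hlen : keys.length = order.length := by simp [hkeys]
  have hspa := PySem.List.bisectLeft_spec keys a hpw
  have hspb := PySem.List.bisectLeft_spec keys b hpw
  rw [PySem.List.slice_natCast]
  have hmem : ∀ m : Nat, m ∈ List.take (hi - lo) (List.drop lo order) ↔
      (m ∈ order ∧ a ≤ key m ∧ key m < b) := by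
    intro m
    constructor
    · intro hm
      rcases List.mem_iff_getElem.mp hm with ⟨t, ht, hget⟩
      have hlt := ht
      simp only [List.length_take, List.length_drop] at hlt
      have ht2 : lo + t < order.length := by omega
      have hget' : order[lo + t]'ht2 = m := by
        rw [← hget]; rw [List.getElem_take, List.getElem_drop]
      have hq : lo + t < keys.length := by omega
      have hkeyq : keys[lo + t]'hq = key m := by
        simp only [hkeys, List.getElem_map]; rw [hget']
      have hge : a ≤ key m := by
        have := hspa.2.2 (lo + t) hq (by omega)
        rwa [hkeyq] at this
      have hltb : key m < b := by
        have := hspb.2.1 (lo + t) hq (by omega)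
        rwa [hkeyq] at this
      exact ⟨hget' ▸ List.getElem_mem ht2, hge, hltb⟩
    · rintro ⟨hm, hge, hltb⟩
      rcases List.mem_iff_getElem.mp hm with ⟨q, hq, hget⟩
      have hqk : q < keys.length := by omega
      have hkeyq : keys[q]'hqk = key m := by
        simp only [hkeys, List.getElem_map]; rw [hget]
      have hloq : lo ≤ q := by
        by_contra h
        have := hspa.2.1 q hqk (by omega)
        rw [hkeyq] at this; omega
      have hqhi : q < hi := by
        by_contra h
        have := hspb.2.2 q hqk (by omega)
        rw [hkeyq] at this; omega
      apply List.mem_iff_getElem.mpr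
      refine ⟨q - lo, by simp only [List.length_take, List.length_drop]; omega, ?_⟩
      rw [List.getElem_take, List.getElem_drop]
      have heq : lo + (q - lo) = q := by omega
      simp only [heq]; exact hget
  apply PySem.List.sorted_id_eq_of_perm_of_pairwise
  · apply (List.perm_ext_iff_of_nodup (List.Nodup.filter _ List.nodup_range)
      (((List.take_sublist _ _).trans (List.drop_sublist _ _)).nodup hnodup)).mpr
    intro m
    rw [List.mem_filter, List.mem_range, hmem]
    simp only [hkey]
    simp [hperm.mem_iff, List.getD]
  · exact ((List.pairwise_lt_range).sublist (List.filter_sublist)).imp (fun h => Nat.le_of_lt h)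

-- The per-interval bodies of the two ports agree, hence the folds agree.
theorem update_eq_alt (ret : List (List Int)) (network : List (Int × List Int)) (syntax_ : List (List Int)) (line0 : Int) (line1 : Int) (new : List Int) :
    update ret network syntax_ line0 line1 new = update_alt ret network syntax_ line0 line1 new := by
  unfold update update_alt
  dsimp only
  refine congrArg (fun st : PySem.Dict Int (List Int) × List Int => (st.1.items, st.2)) ?_
  refine congrArg (fun g => List.foldl g (PySem.Dict.mk network, new) (List.range ret.length)) ?_
  funext st i
  refine congrArg (fun g => List.foldl g st (List.range ((syntax_.getD i []).length - 1))) ?_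
  funext st j
  rw [slice_order_eq_filter (ret.getD i []) ((syntax_.getD i []).getD j 0) ((syntax_.getD i []).getD (j+1) 0)]
  rw [List.foldl_filter]
  simp only [decide_eq_true_eq]

-- ===== VERDICT (by name: the statement is the Claim_ definition above) =====
theorem update_spec : Claim_equal_update := by
  intro ret network syntax_ line0 line1 new _ _
  unfold Spec_update
  exact update_eq_alt ret network syntax_ line0 line1 new
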